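-- pv_equiv track=rewrite | github.com/google/grain | grain/_src/python/lazy_dataset/transformations/mix.py | _counts_per_dataset
-- ===== SOURCE A (Python) =====
-- from collections.abc import Sequence
--
-- def _counts_per_dataset(k: int, proportions: tuple[int, ...]) -> Sequence[int]:
--   """Calculates the counts per dataset at n elements accordings to proportions.
--
--   We are interleaving n infinite datasets into one combined dataset.
--
--   Proportions P is a list of n integers, representing mixing proportions.
--
--   mix(P, k, i) represents the number of examples from component i
--   among the first k examples from the mixed sequence. It is given by the
--   following formula:
--
--     mix(P, k, 0) = ceiling(k * P[0] / sum(P))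
--     mix(P, k, i>0) = mix(P[1:], k - mix(P, k, 0), i - 1)
--
--   Element k of the mixed sequence is equal to element m from component i iff:
--
--     mix(P, k + 1, i) == m + 1  AND
--     mix(P, k, i) == m
--
--   _counts_per_dataset() computes the "mix" function described above.
--
--   _dataset_and_key_of_next_element() maps from the index in the combined
--   dataset to identity of the ID of the source dataset and key in the source
--   dataset.
--
--   Args:
--     k: Number of elements of the mixed sequence.
--     proportions: The mixing proportions for the n dataset.
--
--   Returns:
--     Counts of how many elements from each source dataset are used.
--   """
--   remaining_proportions = sum(proportions)
--   result = []
--   for p in proportions: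
--     new_k = (k * (remaining_proportions - p)) // remaining_proportions
--     result.append(k - new_k)
--     remaining_proportions -= p
--     k = new_k
--   return result
-- ===== SOURCE B (Python) =====
-- def _counts_per_dataset(k: int, proportions: tuple[int, ...]):
--   """Divide and conquer: split the proportions in half; the left half is
--   allocated with the right half's mass carried as an 'outside' total, and the
--   k left over by the left half is threaded into the right half.  A leaf for
--   one dataset takes ceil(k * p / (p + outside)) with exact integer arithmetic,
--   which is the docstring's mix(P, k, 0)."""
--   def go(k, ps, outside):
--     # returns (counts for ps, k remaining after ps)
--     if not ps:
--       return [], k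
--     if len(ps) == 1:
--       total = ps[0] + outside
--       c = -((-(k * ps[0])) // total)
--       return [c], k - c
--     m = len(ps) // 2
--     left, right = ps[:m], ps[m:]
--     lcounts, k1 = go(k, left, sum(right) + outside)
--     rcounts, k2 = go(k1, right, outside)
--     return lcounts + rcounts, k2
--   return go(k, tuple(proportions), 0)[0]
-- ===== Notes on version B (the rewrite author's own statement) =====
-- stated objective: alternative
-- what changed: B is a divide-and-conquer: it splits the proportions in half, allocates the left half while carrying the right half's mass as an 'outside' total, threads the leftover k into the right half, and a single-dataset leaf takes the exact integer ceiling ceil(k*p/(p+outside)); A is a flat loop threading a mutating remaining-sum accumulator and computing each count as k minus a floor of the complementary share.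
import Mathlib
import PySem

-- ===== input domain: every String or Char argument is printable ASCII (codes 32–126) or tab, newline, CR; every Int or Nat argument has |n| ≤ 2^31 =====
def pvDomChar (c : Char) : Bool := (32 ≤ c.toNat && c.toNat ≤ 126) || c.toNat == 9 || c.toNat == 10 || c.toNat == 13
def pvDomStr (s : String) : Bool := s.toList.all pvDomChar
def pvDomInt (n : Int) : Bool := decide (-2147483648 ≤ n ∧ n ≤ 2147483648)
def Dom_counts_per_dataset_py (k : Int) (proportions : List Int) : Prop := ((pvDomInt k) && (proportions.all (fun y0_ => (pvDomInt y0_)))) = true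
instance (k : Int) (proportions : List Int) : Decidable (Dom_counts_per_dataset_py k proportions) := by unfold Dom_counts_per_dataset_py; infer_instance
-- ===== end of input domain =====

-- B replaces A's flat accumulator loop by a divide-and-conquer over the proportions
-- (halve, allocate left with the right half's mass as an outside total, thread the
-- leftover k into the right half); same exact integer results on all of Pre_.

-- ===== PORT A =====
-- the for-loop of A: state (remaining_proportions, k, result); result grows by append
def countsLoopA (rem k : Int) (ps : List Int) (result : List Int) : List Int :=
  match ps with
  | [] => result
  | p :: rest =>
      let new_k := PySem.Int.floordiv (k * (rem - p)) rem
      countsLoopA (rem - p) new_k rest (result ++ [k - new_k])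

def counts_per_dataset_py (k : Int) (proportions : List Int) : List Int :=
  countsLoopA proportions.sum k proportions []

-- ===== PORT B =====
-- Source B's inner go: empty → ([], k); one dataset → the exact ceiling leaf;
-- otherwise split at len//2, do the left with outside += sum(right), then the right
def goB (k : Int) (ps : List Int) (outside : Int) : List Int × Int :=
  match h : ps with
  | [] => ([], k)
  | [p] =>
      let total := p + outside
      let c := -(PySem.Int.floordiv (-(k * p)) total)
      ([c], k - c)
  | _ :: _ :: _ =>
      let m := ps.length / 2
      let left := ps.take m
      let right := ps.drop m
      let l := goB k left (right.sum + outside)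
      let r := goB l.2 right outside
      (l.1 ++ r.1, r.2)
termination_by ps.length
decreasing_by
  · simp_all [List.length_take]; omega
  · simp_all [List.length_drop]; omega

def counts_per_dataset_py_alt (k : Int) (proportions : List Int) : List Int :=
  (goB k proportions 0).1

-- ===== PRECONDITION & SPEC =====
-- Pre_ excludes exactly the inputs where A raises ZeroDivisionError: some nonempty suffix of
-- proportions sums to zero (the loop divides by each suffix sum). B raises there too.
def Pre_counts_per_dataset_py (k : Int) (proportions : List Int) : Prop :=
  ∀ i, i < proportions.length → (proportions.drop i).sum ≠ 0

instance (k : Int) (proportions : List Int) : Decidable (Pre_counts_per_dataset_py k proportions) := by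
  unfold Pre_counts_per_dataset_py; infer_instance

def pvWitness_counts_per_dataset_py : Int × List Int := (7, [2, 1, 3])

def Spec_counts_per_dataset_py (k : Int) (proportions : List Int) (out : List Int) : Prop := out = counts_per_dataset_py_alt k proportions
instance (k : Int) (proportions : List Int) (out : List Int) : Decidable (Spec_counts_per_dataset_py k proportions out) := by unfold Spec_counts_per_dataset_py; infer_instance

-- ===== CLAIM =====
def Claim_equal_counts_per_dataset_py : Prop := ∀ (k : Int) (proportions : List Int), Dom_counts_per_dataset_py k proportions → Pre_counts_per_dataset_py k proportions → Spec_counts_per_dataset_py k proportions (counts_per_dataset_py k proportions)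

-- ===== LEMMAS AND PROOFS =====

-- flat left-to-right reference recursion (proof scaffolding only): one ceiling per head
def specGo (k : Int) (ps : List Int) (outside : Int) : List Int × Int :=
  match ps with
  | [] => ([], k)
  | p :: rest =>
      let c := -(PySem.Int.floordiv (-(k * p)) ((p :: rest).sum + outside))
      let r := specGo (k - c) rest outside
      (c :: r.1, r.2)

theorem specGo_append (l r : List Int) (k outside : Int) :
    specGo k (l ++ r) outside
      = ((specGo k l (r.sum + outside)).1 ++ (specGo (specGo k l (r.sum + outside)).2 r outside).1,
         (specGo (specGo k l (r.sum + outside)).2 r outside).2) := by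
  induction l generalizing k with
  | nil => simp [specGo]
  | cons p rest ih =>
      simp only [List.cons_append, specGo, List.sum_cons, List.sum_append]
      have hc : p + (rest.sum + r.sum) + outside = p + rest.sum + (r.sum + outside) := by ring
      rw [hc, ih]

theorem goB_eq_specGo (n : Nat) : ∀ (ps : List Int), ps.length ≤ n → ∀ (k outside : Int),
    goB k ps outside = specGo k ps outside := by
  induction n with
  | zero =>
      intro ps h k outside
      have : ps = [] := List.length_eq_zero_iff.mp (Nat.le_zero.mp h)
      subst this; simp [goB, specGo]
  | succ n ih =>
      intro ps h k outside
      match ps with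
      | [] => simp [goB, specGo]
      | [p] => simp [goB, specGo]
      | p :: q :: rest =>
          rw [goB]
          have hlen : (p :: q :: rest).length = rest.length + 2 := by simp
          have hm1 : 1 ≤ (p :: q :: rest).length / 2 := by omega
          have hm2 : (p :: q :: rest).length / 2 < (p :: q :: rest).length := by omega
          have hL : ((p :: q :: rest).take ((p :: q :: rest).length / 2)).length ≤ n := by
            simp [List.length_take]; omega
          have hR : ((p :: q :: rest).drop ((p :: q :: rest).length / 2)).length ≤ n := by
            simp [List.length_drop]; omega
          rw [ih _ hL, ih _ hR]
          have hsplit := specGo_append ((p :: q :: rest).take ((p :: q :: rest).length / 2))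
            ((p :: q :: rest).drop ((p :: q :: rest).length / 2)) k outside
          rw [List.take_append_drop] at hsplit
          rw [hsplit]

-- the one step identity: k - ⌊k*(T-p)/T⌋ = ⌈k*p/T⌉ (as -(⌊-(k*p)/T⌋)) for T ≠ 0
theorem step_eq (k p T : Int) (hT : T ≠ 0) :
    k - PySem.Int.floordiv (k * (T - p)) T = -(PySem.Int.floordiv (-(k * p)) T) := by
  unfold PySem.Int.floordiv
  have h1 : k * (T - p) = -(k * p) + k * T := by ring
  have h2 := Int.add_mul_fdiv_right (-(k * p)) k hT
  rw [h1, h2]; ring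

theorem loopA_eq_specGo (ps : List Int) : ∀ (k : Int) (acc : List Int),
    (∀ i, i < ps.length → (ps.drop i).sum ≠ 0) →
    countsLoopA ps.sum k ps acc = acc ++ (specGo k ps 0).1 := by
  induction ps with
  | nil => intro k acc _; simp [countsLoopA, specGo]
  | cons p rest ih =>
      intro k acc hpre
      have hT : (p :: rest).sum ≠ 0 := by
        have := hpre 0 (by simp); simpa using this
      have hrest : ∀ i, i < rest.length → (rest.drop i).sum ≠ 0 := by
        intro i hi
        have := hpre (i + 1) (by simpa using Nat.succ_lt_succ hi)
        simpa using this
      have hstep := step_eq k p ((p :: rest).sum) hT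
      have hsum : (p :: rest).sum - p = rest.sum := by simp
      rw [hsum] at hstep
      simp only [countsLoopA, specGo, add_zero]
      rw [hsum, ih _ _ hrest]
      have hk' : PySem.Int.floordiv (k * rest.sum) ((p :: rest).sum)
          = k - -(PySem.Int.floordiv (-(k * p)) ((p :: rest).sum)) := by omega
      rw [hstep, hk']
      simp

-- ===== VERDICT =====
theorem counts_per_dataset_py_spec : Claim_equal_counts_per_dataset_py := by
  intro k ps _ hpre
  unfold Spec_counts_per_dataset_py counts_per_dataset_py counts_per_dataset_py_alt
  rw [goB_eq_specGo ps.length ps le_rfl]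
  simpa using loopA_eq_specGo ps k [] hpre
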